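-- pv_equiv track=rewrite | github.com/pearshape-ai/pearscarf | pearscarf/scoring.py | match_facts
-- ===== SOURCE A (Python) =====
-- def match_facts(
--     extracted: list[dict],
--     expected: list[dict],
-- ) -> tuple[int, int, int]:
--     """Match extracted facts against expected ground truth.
--
--     Returns (matched, total_extracted, total_expected).
--
--     Match criteria: edge_label equal, fact_type equal, from_entity matches
--     (case-insensitive), to_entity matches (case-insensitive, both None
--     counts as match). Each expected fact matches at most once.
--     """
--     matched_indices: set[int] = set()
--     for ext in extracted:
--         ext_label = ext.get("edge_label", "").upper()
--         ext_ft = ext.get("fact_type", "").lower()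
--         ext_from = (ext.get("from_entity") or "").lower()
--         ext_to = (ext.get("to_entity") or "").lower() or None
--
--         for i, exp in enumerate(expected):
--             if i in matched_indices:
--                 continue
--             exp_label = exp.get("edge_label", "").upper()
--             exp_ft = exp.get("fact_type", "").lower()
--             exp_from = (exp.get("from_entity") or "").lower()
--             exp_to = (exp.get("to_entity") or "").lower() or None
--
--             if (
--                 ext_label == exp_label
--                 and ext_ft == exp_ft
--                 and ext_from == exp_from
--                 and ext_to == exp_to
--             ):
--                 matched_indices.add(i)
--                 break
--
--     return len(matched_indices), len(extracted), len(expected)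
-- ===== SOURCE B (Python) =====
-- def _key(d):
--     to = (d.get("to_entity") or "").lower() or None
--     return (
--         d.get("edge_label", "").upper(),
--         d.get("fact_type", "").lower(),
--         (d.get("from_entity") or "").lower(),
--         to,
--     )
--
--
-- def match_facts(
--     extracted: list[dict],
--     expected: list[dict],
-- ) -> tuple[int, int, int]:
--     """Group expected facts into a key->count table, then consume it in one
--     pass over extracted: matched = sum over keys of min(ext, exp) counts."""
--     remaining: dict = {}
--     for exp in expected:
--         k = _key(exp)
--         remaining[k] = remaining.get(k, 0) + 1
--     matched = 0
--     for ext in extracted: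
--         k = _key(ext)
--         c = remaining.get(k, 0)
--         if c:
--             remaining[k] = c - 1
--             matched += 1
--     return matched, len(extracted), len(expected)
-- ===== Notes on version B (the rewrite author's own statement) =====
-- stated objective: alternative
-- what changed: Replaces A's nested scan over expected (with a matched-index set) by grouping expected facts into a key->count dictionary once and consuming it in a single pass over extracted, summing min(ext,exp) per key; worst-case O(N+M) instead of O(N*M), though A's early break makes it comparable on random data.
-- outside the precondition, e.g. on match_facts([], [{'fact_type': None}]): A returns (0, 0, 1), B raises AttributeError
import Mathlib
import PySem

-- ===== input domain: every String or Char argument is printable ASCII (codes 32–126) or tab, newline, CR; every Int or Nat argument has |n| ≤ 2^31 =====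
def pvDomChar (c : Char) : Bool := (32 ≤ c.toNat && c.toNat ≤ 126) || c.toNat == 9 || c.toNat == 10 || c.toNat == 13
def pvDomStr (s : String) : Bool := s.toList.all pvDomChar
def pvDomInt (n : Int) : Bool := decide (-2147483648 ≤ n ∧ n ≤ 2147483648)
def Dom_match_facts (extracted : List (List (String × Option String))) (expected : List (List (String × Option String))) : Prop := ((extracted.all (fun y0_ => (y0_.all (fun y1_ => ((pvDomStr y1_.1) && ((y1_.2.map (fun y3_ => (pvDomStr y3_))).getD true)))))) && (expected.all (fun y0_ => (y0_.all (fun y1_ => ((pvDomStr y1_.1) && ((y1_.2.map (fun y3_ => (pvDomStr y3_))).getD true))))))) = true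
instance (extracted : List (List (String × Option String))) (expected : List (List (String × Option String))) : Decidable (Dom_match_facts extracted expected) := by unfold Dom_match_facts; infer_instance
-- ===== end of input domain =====

-- B groups expected facts into a key→count dictionary built once and consumed in one
-- pass over extracted, instead of A's per-extracted scan of expected with an index set.

-- ===== PORT A =====
-- Inner 'for i, exp in enumerate(expected): …' loop with its 'break'.
-- 'exp.get("edge_label", "").upper()' raises AttributeError when the stored value is
-- None; those inputs are outside Pre_ — the port substitutes "" there.
def matchInner (ms : PySem.Set Int) (extLabel extFt extFrom : String) (extTo : Option String) : List (Int × List (String × Option String)) → PySem.Set Int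
  | [] => ms
  | (i, exp) :: rest =>
    if ms.contains i then matchInner ms extLabel extFt extFrom extTo rest
    else
      let expLabel := PySem.Str.upper ((PySem.Dict.getD ⟨exp⟩ "edge_label" (some "")).getD "")
      let expFt := PySem.Str.lower ((PySem.Dict.getD ⟨exp⟩ "fact_type" (some "")).getD "")
      let expFrom := PySem.Str.lower ((PySem.Dict.getD ⟨exp⟩ "from_entity" none).getD "")
      let expTo0 := PySem.Str.lower ((PySem.Dict.getD ⟨exp⟩ "to_entity" none).getD "")
      let expTo := if expTo0 = "" then none else some expTo0
      if extLabel = expLabel ∧ extFt = expFt ∧ extFrom = expFrom ∧ extTo = expTo then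
        ms.add i
      else matchInner ms extLabel extFt extFrom extTo rest

def match_facts (extracted : List (List (String × Option String))) (expected : List (List (String × Option String))) : Int × Int × Int :=
  let matchedIndices : PySem.Set Int :=
    extracted.foldl (fun ms ext =>
      let extLabel := PySem.Str.upper ((PySem.Dict.getD ⟨ext⟩ "edge_label" (some "")).getD "")
      let extFt := PySem.Str.lower ((PySem.Dict.getD ⟨ext⟩ "fact_type" (some "")).getD "")
      let extFrom := PySem.Str.lower ((PySem.Dict.getD ⟨ext⟩ "from_entity" none).getD "")
      let extTo0 := PySem.Str.lower ((PySem.Dict.getD ⟨ext⟩ "to_entity" none).getD "")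
      let extTo := if extTo0 = "" then none else some extTo0
      matchInner ms extLabel extFt extFrom extTo (PySem.List.enumerate expected))
      PySem.Set.empty
  (PySem.Set.len matchedIndices, (extracted.length : Int), (expected.length : Int))

-- ===== PORT B =====
-- Source B's '_key'; same None caveat as A's field reads (outside Pre_).
def pvKey (d : List (String × Option String)) : String × String × String × Option String :=
  let to0 := PySem.Str.lower ((PySem.Dict.getD ⟨d⟩ "to_entity" none).getD "")
  ( PySem.Str.upper ((PySem.Dict.getD ⟨d⟩ "edge_label" (some "")).getD "")
  , PySem.Str.lower ((PySem.Dict.getD ⟨d⟩ "fact_type" (some "")).getD "")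
  , PySem.Str.lower ((PySem.Dict.getD ⟨d⟩ "from_entity" none).getD "")
  , if to0 = "" then none else some to0 )

def match_facts_alt (extracted : List (List (String × Option String))) (expected : List (List (String × Option String))) : Int × Int × Int :=
  let remaining : PySem.Dict (String × String × String × Option String) Int :=
    expected.foldl (fun d exp =>
      let k := pvKey exp
      d.insert k (d.getD k 0 + 1)) ⟨[]⟩
  let final : PySem.Dict (String × String × String × Option String) Int × Int :=
    extracted.foldl (fun st ext =>
      let k := pvKey ext
      let c := st.1.getD k 0
      if c ≠ 0 then (st.1.insert k (c - 1), st.2 + 1) else st)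
      (remaining, (0 : Int))
  (final.2, (extracted.length : Int), (expected.length : Int))

-- ===== PRECONDITION & SPEC =====
-- Pre_ excludes inputs in which some dict (in either list) stores None under
-- "edge_label" or "fact_type": Python calls .upper()/.lower() on that value and raises
-- AttributeError as soon as the dict is keyed — A keys expected dicts lazily and so can
-- still return (e.g. when extracted is empty), but B, which keys every dict once,
-- raises there itself, so these inputs are excluded rather than matched.
def pvOkDict (d : List (String × Option String)) : Bool :=
  (PySem.Dict.getD ⟨d⟩ "edge_label" (some "")).isSome && (PySem.Dict.getD ⟨d⟩ "fact_type" (some "")).isSome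

def Pre_match_facts (extracted : List (List (String × Option String))) (expected : List (List (String × Option String))) : Prop :=
  ((extracted ++ expected).all pvOkDict) = true

instance (extracted : List (List (String × Option String))) (expected : List (List (String × Option String))) : Decidable (Pre_match_facts extracted expected) := by unfold Pre_match_facts; infer_instance

def pvWitness_match_facts : (List (List (String × Option String))) × (List (List (String × Option String))) :=
  ([[("edge_label", some "A"), ("from_entity", some "x")]], [[("edge_label", some "a")]])

def Spec_match_facts (extracted : List (List (String × Option String))) (expected : List (List (String × Option String))) (out : Int × Int × Int) : Prop := out = match_facts_alt extracted expected
instance (extracted : List (List (String × Option String))) (expected : List (List (String × Option String))) (out : Int × Int × Int) : Decidable (Spec_match_facts extracted expected out) := by unfold Spec_match_facts; infer_instance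

-- ===== CLAIM (what is proved, stated in full; the proofs are below) =====
def Claim_equal_match_facts : Prop := ∀ (extracted : List (List (String × Option String))) (expected : List (List (String × Option String))), Dom_match_facts extracted expected → Pre_match_facts extracted expected → Spec_match_facts extracted expected (match_facts extracted expected)

-- ===== LEMMAS AND PROOFS =====

-- keys of the expected entries not yet matched (in order) — the abstraction that
-- links A's index set to B's count dictionary
def pvRem (ms : PySem.Set Int) (E : List (Int × List (String × Option String))) : List (String × String × String × Option String) :=
  (E.filter (fun p => !(ms.contains p.1))).map (fun p => pvKey p.2)

theorem pv_contains_eq (t : PySem.Set Int) (x : Int) : t.contains x = decide (x ∈ t) :=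
  List.contains_eq_mem x t

-- A's inner-loop step, with the four field comparisons packed into one key equality
theorem matchInner_cons (ms : PySem.Set Int) (a b c : String) (d : Option String)
    (i : Int) (exp : List (String × Option String)) (rest : List (Int × List (String × Option String))) :
    matchInner ms a b c d ((i, exp) :: rest) =
      if ms.contains i then matchInner ms a b c d rest
      else if (a, b, c, d) = pvKey exp then ms.add i
      else matchInner ms a b c d rest := by
  simp only [matchInner, pvKey]
  by_cases h1 : ms.contains i = true
  · simp
  · simp only [h1, Bool.false_eq_true, if_false]
    exact if_congr (by simp [Prod.ext_iff]) rfl rfl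

theorem matchInner_mem_mono (a b c : String) (d : Option String)
    (E : List (Int × List (String × Option String))) (ms : PySem.Set Int) (y : Int)
    (h : y ∈ ms) : y ∈ matchInner ms a b c d E := by
  induction E generalizing ms with
  | nil => exact h
  | cons p rest ih =>
    obtain ⟨i, exp⟩ := p
    rw [matchInner_cons]
    split
    · exact ih ms h
    · split
      · exact (PySem.Set.mem_add ms i y).mpr (Or.inl h)
      · exact ih ms h

theorem matchInner_mem_src (a b c : String) (d : Option String)
    (E : List (Int × List (String × Option String))) (ms : PySem.Set Int) (y : Int)
    (h : y ∈ matchInner ms a b c d E) : y ∈ ms ∨ y ∈ E.map (·.1) := by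
  induction E generalizing ms with
  | nil => exact Or.inl h
  | cons p rest ih =>
    obtain ⟨i, exp⟩ := p
    rw [matchInner_cons] at h
    split at h
    · rcases ih ms h with h' | h'
      · exact Or.inl h'
      · exact Or.inr (by simp only [List.map_cons]; exact List.mem_cons_of_mem _ h')
    · split at h
      · rcases (PySem.Set.mem_add ms i y).mp h with h' | h'
        · exact Or.inl h'
        · exact Or.inr (by simp [h'])
      · rcases ih ms h with h' | h'
        · exact Or.inl h'
        · exact Or.inr (by simp only [List.map_cons]; exact List.mem_cons_of_mem _ h')

theorem pvRem_cons_mem (t : PySem.Set Int) (i : Int) (exp : List (String × Option String))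
    (rest : List (Int × List (String × Option String))) (h : i ∈ t) :
    pvRem t ((i, exp) :: rest) = pvRem t rest := by
  simp [pvRem, h]

theorem pvRem_cons_not_mem (t : PySem.Set Int) (i : Int) (exp : List (String × Option String))
    (rest : List (Int × List (String × Option String))) (h : i ∉ t) :
    pvRem t ((i, exp) :: rest) = pvKey exp :: pvRem t rest := by
  simp [pvRem, h]

theorem pvRem_congr (t t' : PySem.Set Int) (rest : List (Int × List (String × Option String)))
    (h : ∀ q ∈ rest, (q.1 ∈ t ↔ q.1 ∈ t')) : pvRem t rest = pvRem t' rest := by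
  unfold pvRem
  congr 1
  exact List.filter_congr (fun q hq => by simp [h q hq])

theorem pv_len_add (ms : PySem.Set Int) (i : Int) (h : i ∉ ms) :
    PySem.Set.len (ms.add i) = PySem.Set.len ms + 1 := by
  simp [PySem.Set.add, PySem.Set.len, h]

theorem matchInner_spec (a b c : String) (d : Option String)
    (E : List (Int × List (String × Option String))) (ms : PySem.Set Int)
    (hE : E.Pairwise (fun p q => p.1 ≠ q.1)) :
    PySem.Set.len (matchInner ms a b c d E)
        = PySem.Set.len ms + (if (a, b, c, d) ∈ pvRem ms E then 1 else 0)
    ∧ pvRem (matchInner ms a b c d E) E = (pvRem ms E).erase (a, b, c, d) := by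
  induction E generalizing ms with
  | nil => simp [matchInner, pvRem]
  | cons p rest ih =>
    obtain ⟨i, exp⟩ := p
    have hi : ∀ q ∈ rest, i ≠ q.1 := (List.pairwise_cons.mp hE).1
    have hrest := (List.pairwise_cons.mp hE).2
    rw [matchInner_cons]
    by_cases h1 : ms.contains i = true
    · have h1m : i ∈ ms := by simpa [pv_contains_eq] using h1
      rw [if_pos h1, pvRem_cons_mem ms i exp rest h1m,
        pvRem_cons_mem _ i exp rest (matchInner_mem_mono a b c d rest ms i h1m)]
      exact ih ms hrest
    · have h1m : i ∉ ms := by simpa [pv_contains_eq] using h1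
      rw [if_neg h1, pvRem_cons_not_mem ms i exp rest h1m]
      by_cases h2 : (a, b, c, d) = pvKey exp
      · rw [if_pos h2]
        refine ⟨?_, ?_⟩
        · rw [pv_len_add ms i h1m]
          simp [h2]
        · rw [h2, List.erase_cons_head,
            pvRem_cons_mem _ i exp rest ((PySem.Set.mem_add ms i i).mpr (Or.inr rfl))]
          exact pvRem_congr _ _ rest (fun q hq => by
            rw [PySem.Set.mem_add]
            simp [(hi q hq).symm])
      · rw [if_neg h2]
        obtain ⟨ihl, ihr⟩ := ih ms hrest
        have hnotin : i ∉ matchInner ms a b c d rest := by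
          intro hmem
          rcases matchInner_mem_src a b c d rest ms i hmem with h' | h'
          · exact h1m h'
          · obtain ⟨q, hq, hq1⟩ := List.mem_map.mp h'
            exact hi q hq hq1.symm
        rw [pvRem_cons_not_mem _ i exp rest hnotin, ihr, ihl]
        refine ⟨?_, ?_⟩
        · congr 1
          exact if_congr (by simp [h2]) rfl rfl
        · rw [List.erase_cons_tail (by simpa using (Ne.symm h2))]

-- the two folds над extracted, in the (definitionally equal) pvKey-form of the ports
theorem pv_fold_spec (expected : List (List (String × Option String)))
    (exts : List (List (String × Option String)))
    (ms : PySem.Set Int) (cnts : PySem.Dict (String × String × String × Option String) Int) (m : Int)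
    (h1 : PySem.Set.len ms = m)
    (h2 : ∀ k, cnts.getD k 0 = ((pvRem ms (PySem.List.enumerate expected)).count k : Int)) :
    PySem.Set.len (exts.foldl (fun ms ext =>
        matchInner ms (pvKey ext).1 (pvKey ext).2.1 (pvKey ext).2.2.1 (pvKey ext).2.2.2
          (PySem.List.enumerate expected)) ms)
      = (exts.foldl (fun st ext =>
          if st.1.getD (pvKey ext) 0 ≠ 0 then (st.1.insert (pvKey ext) (st.1.getD (pvKey ext) 0 - 1), st.2 + 1)
          else st) (cnts, m)).2 := by
  induction exts generalizing ms cnts m with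
  | nil => simpa using h1
  | cons ext rest ih =>
    simp only [List.foldl_cons]
    have hEp : (PySem.List.enumerate expected).Pairwise (fun p q : Int × List (String × Option String) => p.1 ≠ q.1) :=
      (PySem.List.pairwise_lt_enumerate expected 0).imp (fun h => ne_of_lt h)
    have hktup : ((pvKey ext).1, (pvKey ext).2.1, (pvKey ext).2.2.1, (pvKey ext).2.2.2) = pvKey ext := rfl
    obtain ⟨hlen, hrem⟩ := matchInner_spec (pvKey ext).1 (pvKey ext).2.1 (pvKey ext).2.2.1
      (pvKey ext).2.2.2 (PySem.List.enumerate expected) ms hEp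
    rw [hktup] at hlen hrem
    by_cases hmem : pvKey ext ∈ pvRem ms (PySem.List.enumerate expected)
    · have hcount : 0 < (pvRem ms (PySem.List.enumerate expected)).count (pvKey ext) :=
        List.count_pos_iff.mpr hmem
      have hcne : cnts.getD (pvKey ext) 0 ≠ 0 := by
        rw [h2]
        exact_mod_cast Nat.pos_iff_ne_zero.mp hcount
      rw [if_pos hcne]
      refine ih _ _ _ ?_ ?_
      · rw [hlen, if_pos hmem, h1]
      · intro k'
        by_cases hk' : k' = pvKey ext
        · subst hk'
          rw [PySem.Dict.getD_insert_self, hrem, List.count_erase_self, h2]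
          omega
        · rw [PySem.Dict.getD_insert_of_ne _ _ _ hk', hrem, List.count_erase_of_ne hk', h2]
    · have hc0 : (pvRem ms (PySem.List.enumerate expected)).count (pvKey ext) = 0 :=
        Nat.eq_zero_of_not_pos (fun h => hmem (List.count_pos_iff.mp h))
      have hceq : ¬(cnts.getD (pvKey ext) 0 ≠ 0) := by
        rw [h2, hc0]
        simp
      rw [if_neg hceq]
      refine ih _ _ _ ?_ ?_
      · rw [hlen, if_neg hmem, add_zero, h1]
      · intro k'
        rw [hrem, List.erase_of_not_mem hmem, h2]

theorem pvRem_empty (expected : List (List (String × Option String))) :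
    pvRem PySem.Set.empty (PySem.List.enumerate expected) = expected.map pvKey := by
  unfold pvRem
  rw [List.filter_congr (q := fun _ => true) (fun q _ => by simp [PySem.Set.empty]),
    List.filter_true,
    show (fun p : Int × List (String × Option String) => pvKey p.2) = pvKey ∘ (fun p => p.2) from rfl,
    ← List.map_map, PySem.List.map_snd_enumerate]

theorem pv_remaining_getD (expected : List (List (String × Option String)))
    (k : String × String × String × Option String) :
    (expected.foldl (fun d exp => d.insert (pvKey exp) (d.getD (pvKey exp) 0 + 1))
        (⟨[]⟩ : PySem.Dict (String × String × String × Option String) Int)).getD k 0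
      = ((expected.map pvKey).count k : Int) := by
  rw [← List.foldl_map (f := pvKey)
      (g := fun (d : PySem.Dict (String × String × String × Option String) Int) x => d.insert x (d.getD x 0 + 1)),
    PySem.Dict.getD_foldl_insert_add_one]
  simp [PySem.Dict.getD, PySem.Dict.get?]

-- ===== VERDICT (by name: the statement is the Claim_ definition above) =====
theorem match_facts_spec : Claim_equal_match_facts := by
  unfold Claim_equal_match_facts
  intro extracted expected _ _
  unfold Spec_match_facts
  show (PySem.Set.len (extracted.foldl (fun ms ext =>
        matchInner ms (pvKey ext).1 (pvKey ext).2.1 (pvKey ext).2.2.1 (pvKey ext).2.2.2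
          (PySem.List.enumerate expected)) PySem.Set.empty),
      (extracted.length : Int), (expected.length : Int))
    = ((extracted.foldl (fun (st : PySem.Dict (String × String × String × Option String) Int × Int) ext =>
          if st.1.getD (pvKey ext) 0 ≠ 0 then (st.1.insert (pvKey ext) (st.1.getD (pvKey ext) 0 - 1), st.2 + 1)
          else st)
        (expected.foldl (fun (d : PySem.Dict (String × String × String × Option String) Int) exp =>
          d.insert (pvKey exp) (d.getD (pvKey exp) 0 + 1)) ⟨[]⟩, (0 : Int))).2,
      (extracted.length : Int), (expected.length : Int))
  refine Prod.ext ?_ rfl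
  exact pv_fold_spec expected extracted PySem.Set.empty _ 0 rfl
    (fun k => by rw [pv_remaining_getD, pvRem_empty])
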